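-- pv_equiv track=rewrite | github.com/shosae/Coding-Test | 프로그래머스/1/160586. 대충 만든 자판/대충 만든 자판.py | solution
-- ===== SOURCE A (Python) =====
-- def solution(keymap, targets):
--     ans = [0 for i in range(len(targets))]
--     hash_keymap = {}
--     for keys in keymap:
--         for idx, key in enumerate(keys):
--             if key not in hash_keymap:
--                 hash_keymap[key] = idx+1
--             else:
--                 if hash_keymap[key] > idx+1:
--                     hash_keymap[key] = idx+1
--
--     for idx, t in enumerate(targets):
--         for ch in t:
--             if ch in hash_keymap:
--                 ans[idx] += hash_keymap[ch]
--             else: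
--                 ans[idx] = -1
--                 break
--     return ans
-- ===== SOURCE B (Python) =====
-- def solution(keymap, targets):
--     # Dictionary-free: each target character's cost is computed on demand as the
--     # minimum, over the keymap strings, of its first-occurrence position (1-based).
--     def first_pos(s, ch):
--         for i, c in enumerate(s):
--             if c == ch:
--                 return i + 1
--         return 0  # not present
--
--     def cost(ch):
--         hits = [p for p in (first_pos(k, ch) for k in keymap) if p > 0]
--         return min(hits) if hits else -1
--
--     result = []
--     for t in targets:
--         costs = [cost(ch) for ch in t]
--         result.append(-1 if -1 in costs else sum(costs))
--     return result
-- ===== Notes on version B (the rewrite author's own statement) =====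
-- stated objective: alternative
-- what changed: The precomputed minimum-position dictionary is removed entirely: B answers each target character on demand by scanning the keymap strings with a first-occurrence helper and taking the minimum position (sentinel -1), then decides -1 vs sum over the per-character cost list; A instead pre-builds a hash map over every occurrence and accumulates with an early break while mutating a pre-filled answer list.
import Mathlib
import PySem

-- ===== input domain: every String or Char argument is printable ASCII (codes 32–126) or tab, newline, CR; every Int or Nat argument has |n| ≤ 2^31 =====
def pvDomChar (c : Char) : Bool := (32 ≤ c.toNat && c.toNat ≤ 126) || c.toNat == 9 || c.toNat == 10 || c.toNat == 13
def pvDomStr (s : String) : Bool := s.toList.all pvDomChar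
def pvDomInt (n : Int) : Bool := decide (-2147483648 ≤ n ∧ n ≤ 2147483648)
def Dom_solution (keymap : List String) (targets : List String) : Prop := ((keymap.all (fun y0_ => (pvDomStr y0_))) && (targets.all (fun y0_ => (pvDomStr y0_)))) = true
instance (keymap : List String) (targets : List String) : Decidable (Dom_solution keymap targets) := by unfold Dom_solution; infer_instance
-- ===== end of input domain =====

-- B drops A's precomputed minimum-position dictionary entirely: each target character's cost is
-- computed on demand as the minimum over the keymap strings of its first-occurrence position,
-- then each target is answered from its per-character cost list. Objective: alternative.

-- ===== PORT A =====
-- A's nested dict-building loop, step for step (hash_keymap[key] is read only when present,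
-- so getD 0 is exact there).
def aBuild (keymap : List String) : PySem.Dict Char Int :=
  keymap.foldl (fun d keys =>
    (PySem.List.enumerate keys.toList 0).foldl (fun d p =>
      if d.contains p.2 = false then d.insert p.2 (p.1 + 1)
      else if d.getD p.2 0 > p.1 + 1 then d.insert p.2 (p.1 + 1) else d) d)
    PySem.Dict.empty

-- A's inner per-target loop: accumulate hash_keymap[ch], or set -1 and break; A pre-fills
-- ans with zeros and in the idx-th outer iteration mutates only ans[idx], so ans[idx] is this
-- scan started from 0.
def aScan (d : PySem.Dict Char Int) : List Char → Int → Int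
  | [], acc => acc
  | c :: cs, acc =>
    match d.get? c with
    | some v => aScan d cs (acc + v)
    | none => -1

def solution (keymap : List String) (targets : List String) : List Int :=
  let hash_keymap := aBuild keymap
  targets.map (fun t => aScan hash_keymap t.toList 0)

-- ===== PORT B =====
-- Source B's first_pos: scan enumerate(s), return i+1 at the first match, else 0.
def bFirstPos : List Char → Char → Int → Int
  | [], _, _ => 0
  | c :: cs, ch, i => if c = ch then i + 1 else bFirstPos cs ch (i + 1)

-- Source B's cost: the positive first-occurrence positions across keymap, their min, or -1.
def bCost (keymap : List String) (ch : Char) : Int :=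
  let hits := (keymap.map (fun k => bFirstPos k.toList ch 0)).filter (fun p => 0 < p)
  match PySem.List.min? hits (fun x => x) with
  | some m => m
  | none => -1

def solution_alt (keymap : List String) (targets : List String) : List Int :=
  targets.foldl (fun result t =>
    let costs := t.toList.map (fun ch => bCost keymap ch)
    result ++ [if costs.contains (-1) then -1 else costs.sum]) []

-- ===== PRECONDITION & SPEC =====
def Spec_solution (keymap : List String) (targets : List String) (out : List Int) : Prop := out = solution_alt keymap targets
instance (keymap : List String) (targets : List String) (out : List Int) : Decidable (Spec_solution keymap targets out) := by unfold Spec_solution; infer_instance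

-- ===== CLAIM =====
def Claim_equal_solution : Prop := ∀ (keymap : List String) (targets : List String), Dom_solution keymap targets → Spec_solution keymap targets (solution keymap targets)

-- ===== LEMMAS AND PROOFS =====

-- Option-valued first occurrence of c in cs, positions offset by s (proof-side helper).
def occ : List Char → Char → Int → Option Int
  | [], _, _ => none
  | x :: xs, c, s => if x = c then some (s + 1) else occ xs c (s + 1)

-- Minimum-combining merge of two optional positions.
def mergeO : Option Int → Option Int → Option Int
  | none, b => b
  | some a, none => some a
  | some a, some b => some (min a b)

theorem occ_ge (cs : List Char) (c : Char) (s v : Int) (h : occ cs c s = some v) : s + 1 ≤ v := by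
  induction cs generalizing s with
  | nil => simp [occ] at h
  | cons x xs ih =>
    by_cases hx : x = c
    · simp [occ, hx] at h; omega
    · simp [occ, hx] at h; have := ih (s + 1) h; omega

theorem bFirstPos_eq_occ (cs : List Char) (c : Char) (s : Int) :
    bFirstPos cs c s = (occ cs c s).getD 0 := by
  induction cs generalizing s with
  | nil => rfl
  | cons x xs ih => by_cases hx : x = c <;> simp [bFirstPos, occ, hx, ih]

-- A's inner fold over one keymap string updates the dict, per key, by merging in the
-- first occurrence of that key in the string.
theorem inner_get? (cs : List Char) (d : PySem.Dict Char Int) (s : Int) (c : Char) :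
    ((PySem.List.enumerate cs s).foldl (fun d p =>
      if d.contains p.2 = false then d.insert p.2 (p.1 + 1)
      else if d.getD p.2 0 > p.1 + 1 then d.insert p.2 (p.1 + 1) else d) d).get? c
    = mergeO (d.get? c) (occ cs c s) := by
  induction cs generalizing d s with
  | nil => cases h : d.get? c <;> simp [PySem.List.enumerate_nil, occ, mergeO, h]
  | cons x xs ih =>
    rw [PySem.List.enumerate_cons, List.foldl_cons, ih]
    by_cases hx : x = c
    · subst hx
      cases hg : d.get? x with
      | none =>
        have hc : d.contains x = false := by
          rw [PySem.Dict.contains_eq_isSome_get?, hg]; rfl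
        simp only [hc, if_true]
        rw [PySem.Dict.get?_insert_self]
        simp only [occ, if_true]
        cases ho : occ xs x (s + 1) with
        | none => rfl
        | some v => have := occ_ge xs x (s + 1) v ho; simp [mergeO]; omega
      | some a =>
        have hc : d.contains x = true := by
          rw [PySem.Dict.contains_eq_isSome_get?, hg]; rfl
        have hgd : d.getD x 0 = a := by rw [PySem.Dict.getD_eq_get?_getD, hg]; rfl
        simp only [hc, hgd, occ, if_true, Bool.true_eq_false, if_false]
        by_cases hlt : a > s + 1
        · simp only [if_pos hlt]
          rw [PySem.Dict.get?_insert_self]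
          cases ho : occ xs x (s + 1) with
          | none => simp [mergeO]; omega
          | some v => have := occ_ge xs x (s + 1) v ho; simp [mergeO]; omega
        · simp only [if_neg hlt, hg]
          cases ho : occ xs x (s + 1) with
          | none => simp [mergeO]; omega
          | some v => have := occ_ge xs x (s + 1) v ho; simp [mergeO]; omega
    · have hocc : occ (x :: xs) c s = occ xs c (s + 1) := by simp [occ, hx]
      rw [hocc]
      congr 1
      by_cases hcx : d.contains x = false
      · simp only [hcx, if_true]
        exact PySem.Dict.get?_insert_of_ne d (s + 1) (fun h => hx h.symm)
      · simp only [hcx]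
        by_cases hlt : d.getD x 0 > s + 1
        · simp only [if_pos hlt]
          exact PySem.Dict.get?_insert_of_ne d (s + 1) (fun h => hx h.symm)
        · simp [hlt]

-- The whole dict build, read at one key, is a fold of mergeO over per-string occurrences.
def bestFrom (keymap : List String) (c : Char) (o : Option Int) : Option Int :=
  keymap.foldl (fun o k => mergeO o (occ k.toList c 0)) o

theorem aBuild_get? (keymap : List String) (c : Char) :
    (aBuild keymap).get? c = bestFrom keymap c none := by
  unfold aBuild bestFrom
  have main : ∀ (ks : List String) (d : PySem.Dict Char Int),
      (ks.foldl (fun d keys =>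
        (PySem.List.enumerate keys.toList 0).foldl (fun d p =>
          if d.contains p.2 = false then d.insert p.2 (p.1 + 1)
          else if d.getD p.2 0 > p.1 + 1 then d.insert p.2 (p.1 + 1) else d) d) d).get? c
      = ks.foldl (fun o k => mergeO o (occ k.toList c 0)) (d.get? c) := by
    intro ks
    induction ks with
    | nil => intro d; rfl
    | cons k ks ih => intro d; rw [List.foldl_cons, ih, List.foldl_cons, inner_get? k.toList d 0 c]
  rw [main]
  simp [PySem.Dict.get?_empty]

-- The mergeO fold equals the running min over the positive first positions (Source B's hits list).
theorem fold_merge_some (ks : List String) (c : Char) (a : Int) :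
    bestFrom ks c (some a)
      = some (((ks.map (fun k => bFirstPos k.toList c 0)).filter (fun p => 0 < p)).foldl min a) := by
  induction ks generalizing a with
  | nil => rfl
  | cons k ks ih =>
    unfold bestFrom
    rw [List.foldl_cons, List.map_cons, List.filter_cons, bFirstPos_eq_occ]
    cases ho : occ k.toList c 0 with
    | none => simpa [mergeO] using ih a
    | some v =>
      have hv := occ_ge k.toList c 0 v ho
      have hpos : (0 : Int) < v := by omega
      simp only [Option.getD_some, decide_eq_true_eq, hpos, if_pos, mergeO, List.foldl_cons]
      simpa [mergeO] using ih (min a v)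

theorem fold_merge_none (ks : List String) (c : Char) :
    bestFrom ks c none
      = match (ks.map (fun k => bFirstPos k.toList c 0)).filter (fun p => 0 < p) with
        | [] => none
        | h :: t => some (t.foldl min h) := by
  induction ks with
  | nil => rfl
  | cons k ks ih =>
    unfold bestFrom
    rw [List.foldl_cons, List.map_cons, List.filter_cons, bFirstPos_eq_occ]
    cases ho : occ k.toList c 0 with
    | none => simpa [mergeO] using ih
    | some v =>
      have hv := occ_ge k.toList c 0 v ho
      have hpos : (0 : Int) < v := by omega
      simp only [Option.getD_some, decide_eq_true_eq, hpos, if_pos, mergeO]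
      exact fold_merge_some ks c v

-- bCost is exactly the sentinel form of the dict lookup.
theorem bCost_eq (keymap : List String) (c : Char) :
    bCost keymap c = match (aBuild keymap).get? c with
                     | some v => v
                     | none => -1 := by
  rw [aBuild_get?, fold_merge_none]
  unfold bCost
  cases hl : (keymap.map (fun k => bFirstPos k.toList c 0)).filter (fun p => 0 < p) with
  | nil => simp [PySem.List.min?]
  | cons h t => simp [PySem.List.min?_id_cons]

-- Any value stored in the dict is positive.
theorem get?_pos (keymap : List String) (c : Char) (v : Int)
    (h : (aBuild keymap).get? c = some v) : 1 ≤ v := by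
  rw [aBuild_get?, fold_merge_none] at h
  cases hl : (keymap.map (fun k => bFirstPos k.toList c 0)).filter (fun p => 0 < p) with
  | nil => rw [hl] at h; simp at h
  | cons x t =>
    rw [hl] at h
    simp only [Option.some.injEq] at h
    have hmem := PySem.List.foldl_min_mem t x
    have hall : ∀ y ∈ x :: t, (0 : Int) < y := by
      intro y hy
      have : y ∈ (keymap.map (fun k => bFirstPos k.toList c 0)).filter (fun p => 0 < p) := by
        rw [hl]; exact hy
      have := List.of_mem_filter this
      simpa using this
    rcases hmem with heq | hmemt
    · have := hall x (by simp); omega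
    · have := hall _ (List.mem_cons_of_mem _ hmemt); omega

-- A's interleaved scan equals the -1-membership / sum decomposition of B's cost list.
theorem scan_eq (keymap : List String) (cs : List Char) (acc : Int) :
    aScan (aBuild keymap) cs acc =
      if (cs.map (fun ch => bCost keymap ch)).contains (-1) then -1
      else acc + (cs.map (fun ch => bCost keymap ch)).sum := by
  induction cs generalizing acc with
  | nil => simp [aScan]
  | cons c cs ih =>
    cases hget : (aBuild keymap).get? c with
    | none =>
      have hc : bCost keymap c = -1 := by rw [bCost_eq, hget]
      simp [aScan, hget, hc]
    | some v =>
      have hc : bCost keymap c = v := by rw [bCost_eq, hget]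
      have hv : 1 ≤ v := get?_pos keymap c v hget
      have red : aScan (aBuild keymap) (c :: cs) acc = aScan (aBuild keymap) cs (acc + v) := by
        simp [aScan, hget]
      rw [red, ih]
      have hne : ((-1 : Int) == v) = false := beq_eq_false_iff_ne.mpr (by omega)
      simp only [List.map_cons, List.contains_cons, hc, hne, Bool.false_or]
      by_cases hmem : (cs.map (fun ch => bCost keymap ch)).contains (-1) = true
      · rw [if_pos hmem, if_pos hmem]
      · rw [if_neg hmem, if_neg hmem]
        simp only [List.sum_cons]
        omega

-- ===== VERDICT =====
theorem solution_spec : Claim_equal_solution := by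
  intro keymap targets _
  unfold Spec_solution solution solution_alt
  rw [PySem.List.foldl_append_singleton_eq_map]
  exact List.map_congr_left (fun t _ => by rw [scan_eq]; simp)
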